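-- pv_equiv track=rewrite | github.com/comparch-security/chipyard-random-llc | tools/hashtest/hashfun.py | xorstage
-- ===== SOURCE A (Python) =====
-- def bitssel(a, hi, lo):
--     result = a & (~(-1 << (hi + 1)))
--     result = result >> lo
--     return result
--
-- def xorstage(a, width, stages):
--     assert stages >= 1
--     result    = a
--     midresult = 0
--     for i in range(0, stages):
--         midresult = bitssel(result, 0, 0) ^ bitssel(result, 2, 2) ^ bitssel(result, width - 1, width - 1)
--         for j in range(1, width): midresult = midresult + ((bitssel(result, j-1, j-1) ^ bitssel(result, j, j)) << j)
--         result = midresult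
--     return result
-- ===== SOURCE B (Python) =====
-- def xorstage(a, width, stages):
--     assert stages >= 1
--     mask = (1 << width) - 1
--     result = a
--     for _ in range(stages):
--         low = (result ^ (result >> 2) ^ (result >> (width - 1))) & 1
--         result = (((result ^ (result << 1)) & mask) & ~1) | low
--     return result
-- ===== Notes on version B (the rewrite author's own statement) =====
-- stated objective: faster
-- what changed: A extracts and recombines the result bit by bit with an inner loop over width calling bitssel four times per bit; B computes each whole stage with a constant number of word-level big-int operations ((r ^ (r<<1)) & mask, with bit 0 patched via (r ^ (r>>2) ^ (r>>(width-1))) & 1), removing the inner loop.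
import Mathlib
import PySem

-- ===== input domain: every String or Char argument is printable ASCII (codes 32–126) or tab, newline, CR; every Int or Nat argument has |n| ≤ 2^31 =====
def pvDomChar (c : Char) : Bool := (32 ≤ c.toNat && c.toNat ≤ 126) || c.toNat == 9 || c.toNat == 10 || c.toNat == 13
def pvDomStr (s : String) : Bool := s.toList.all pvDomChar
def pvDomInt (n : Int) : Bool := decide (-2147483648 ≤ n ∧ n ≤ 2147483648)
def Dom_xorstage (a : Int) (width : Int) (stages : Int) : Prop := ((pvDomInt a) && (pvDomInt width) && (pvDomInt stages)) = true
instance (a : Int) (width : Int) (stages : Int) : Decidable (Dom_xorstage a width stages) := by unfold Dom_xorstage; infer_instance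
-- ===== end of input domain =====

-- B replaces A's per-bit inner loop by a constant number of whole-word bit operations per stage ('faster' objective).

-- ===== PORT A =====
def pvBitssel (a : Int) (hi : Int) (lo : Int) : Int :=
  let result := PySem.Int.band a (Int.not ((-1 : Int) <<< (hi + 1).toNat))
  result >>> lo.toNat

def xorstage (a : Int) (width : Int) (stages : Int) : Int :=
  ((PySem.List.pyRange 0 stages).foldl
    (fun (st : Int × Int) _ =>
      let result := st.1
      let mid0 := PySem.Int.bxor (PySem.Int.bxor (pvBitssel result 0 0) (pvBitssel result 2 2))
        (pvBitssel result (width - 1) (width - 1))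
      let mid := (PySem.List.pyRange 1 width).foldl
        (fun midresult j =>
          midresult + PySem.Int.bxor (pvBitssel result (j - 1) (j - 1)) (pvBitssel result j j) <<< j.toNat)
        mid0
      (mid, mid))
    (a, 0)).1

-- ===== PORT B =====
def xorstage_alt (a : Int) (width : Int) (stages : Int) : Int :=
  let mask : Int := (1 : Int) <<< width.toNat - 1
  (PySem.List.pyRange 0 stages).foldl
    (fun result _ =>
      let low := PySem.Int.band
        (PySem.Int.bxor (PySem.Int.bxor result (result >>> (2 : Nat))) (result >>> (width - 1).toNat)) 1
      PySem.Int.bor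
        (PySem.Int.band (PySem.Int.band (PySem.Int.bxor result (result <<< (1 : Nat))) mask) (Int.not 1)) low)
    a

-- ===== PRECONDITION & SPEC =====
-- Python A raises for stages < 1 (assert) and for width < 1 (negative shift count in bitssel → ValueError).
def Pre_xorstage (a : Int) (width : Int) (stages : Int) : Prop := 1 ≤ width ∧ 1 ≤ stages
instance (a : Int) (width : Int) (stages : Int) : Decidable (Pre_xorstage a width stages) := by
  unfold Pre_xorstage; infer_instance
def pvWitness_xorstage : Int × Int × Int := (5, 4, 2)

def Spec_xorstage (a : Int) (width : Int) (stages : Int) (out : Int) : Prop := out = xorstage_alt a width stages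
instance (a : Int) (width : Int) (stages : Int) (out : Int) : Decidable (Spec_xorstage a width stages out) := by
  unfold Spec_xorstage; infer_instance

-- ===== CLAIM (what is proved, stated in full; the proofs are below) =====
def Claim_equal_xorstage : Prop := ∀ (a : Int) (width : Int) (stages : Int), Dom_xorstage a width stages → Pre_xorstage a width stages → Spec_xorstage a width stages (xorstage a width stages)

-- ===== LEMMAS AND PROOFS =====

-- uniqueness of the Euclidean remainder
lemma pv_emod_unique (a r M : Int) (h0 : 0 ≤ r) (h1 : r < M) (hd : M ∣ a - r) : a % M = r := by
  have h2 : a % M = r % M :=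
    Int.emod_eq_emod_iff_emod_sub_eq_zero.mpr ((PySem.Int.emod_eq_zero_iff_dvd _ _).mpr hd)
  rw [h2, Int.emod_eq_of_lt h0 h1]

-- peeling the top bit off a mask-by-2^(k+1)
lemma pv_sum_bit (x : Int) (k : Nat) :
    x % 2 ^ (k + 1) = x % 2 ^ k + ((x >>> k) % 2) * 2 ^ k := by
  have hM : (0 : Int) < 2 ^ k := by positivity
  have hq : x >>> k = x / 2 ^ k := by
    rw [Int.shiftRight_eq_div_pow]; push_cast; ring_nf
  set q := x / 2 ^ k with hqdef
  have e1 : 2 ^ k * q + x % 2 ^ k = x := (Int.ediv_add_emod x (2 ^ k) : _)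
  have hq2 : q = 2 * (q / 2) + q % 2 := by omega
  have hr0 : 0 ≤ x % 2 ^ k := Int.emod_nonneg x (by omega)
  have hr1 : x % 2 ^ k < 2 ^ k := Int.emod_lt_of_pos x hM
  rw [hq]
  refine pv_emod_unique _ _ _ ?_ ?_ ⟨q / 2, ?_⟩
  · have : 0 ≤ q % 2 := by omega
    nlinarith
  · have : q % 2 ≤ 1 := by omega
    have : (2 : Int) ^ (k + 1) = 2 ^ k * 2 := by ring
    nlinarith
  · have : (2 : Int) ^ (k + 1) = 2 ^ k * 2 := by ring
    rw [this]; nlinarith [hq2, e1]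

-- a & (2^k - 1) = a mod 2^k, for every integer a
lemma pv_band_mask (x : Int) (k : Nat) : PySem.Int.band x (2 ^ k - 1) = x % 2 ^ k := by
  have hk1 : (1 : Nat) ≤ 2 ^ k := Nat.one_le_two_pow
  have hcast : ((2 ^ k - 1 : Nat) : Int) = 2 ^ k - 1 := by
    push_cast [Nat.cast_sub hk1]; ring
  have htn : ((2 : Int) ^ k - 1).toNat = 2 ^ k - 1 := by omega
  have hk1' : (1 : Int) ≤ 2 ^ k := by exact_mod_cast hk1
  by_cases hx : 0 ≤ x
  · rw [PySem.Int.band_of_nonneg hx (by omega)]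
    rw [htn, Nat.and_two_pow_sub_one_eq_mod]
    have hxe : (x.toNat : Int) = x := Int.toNat_of_nonneg hx
    rw [← hxe]
    norm_cast
  · simp only [PySem.Int.band]
    rw [if_neg hx, if_pos (by omega : (0:Int) ≤ 2 ^ k - 1)]
    set u := (-x - 1).toNat with hu
    have hue : (u : Int) = -x - 1 := Int.toNat_of_nonneg (by omega)
    rw [htn, Nat.and_comm, Nat.and_two_pow_sub_one_eq_mod]
    have hlt : u % 2 ^ k < 2 ^ k := Nat.mod_lt _ (by positivity)
    have hdm := Nat.div_add_mod u (2 ^ k)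
    symm
    have hdm' : ((2 : Int) ^ k) * ((u / 2 ^ k : Nat) : Int) + ((u % 2 ^ k : Nat) : Int) = (u : Int) := by
      exact_mod_cast congrArg (fun t : Nat => (t : Int)) hdm
    have hlt' : ((u % 2 ^ k : Nat) : Int) < 2 ^ k := by exact_mod_cast hlt
    have hW : (0 : Int) ≤ ((u % 2 ^ k : Nat) : Int) := Int.natCast_nonneg _
    have hv : (((2 ^ k - 1 - u % 2 ^ k : Nat)) : Int) = 2 ^ k - 1 - ((u % 2 ^ k : Nat) : Int) := by
      rw [Nat.cast_sub (by omega : u % 2 ^ k ≤ 2 ^ k - 1), Nat.cast_sub hk1]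
      push_cast
      ring
    refine pv_emod_unique _ _ _ ?_ ?_ ⟨-((u / 2 ^ k : Nat) : Int) - 1, ?_⟩
    · exact Int.natCast_nonneg _
    · rw [hv]; omega
    · rw [hv]; linear_combination hdm' + hue

-- parity of an integer xor
lemma pv_bxor_emod2 (a b : Int) : PySem.Int.bxor a b % 2 = (a + b) % 2 := by
  simp only [PySem.Int.bxor]
  split_ifs with h1 h2 h2
  · have hx := Nat.xor_mod_two_eq (m := a.toNat) (n := b.toNat)
    omega
  · have hx := Nat.xor_mod_two_eq (m := a.toNat) (n := (-b - 1).toNat)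
    omega
  · have hx := Nat.xor_mod_two_eq (m := (-a - 1).toNat) (n := b.toNat)
    omega
  · have hx := Nat.xor_mod_two_eq (m := (-a - 1).toNat) (n := (-b - 1).toNat)
    omega

-- integer xor commutes with arithmetic right shift by one
lemma pv_bxor_shr (a b : Int) :
    PySem.Int.bxor a b >>> (1 : Nat) = PySem.Int.bxor (a >>> (1 : Nat)) (b >>> (1 : Nat)) := by
  have hs : ∀ x : Int, x >>> (1 : Nat) = x / 2 := by
    intro x; rw [Int.shiftRight_eq_div_pow]; norm_num
  have hxr : ∀ m n : Nat, (m ^^^ n) / 2 = (m / 2) ^^^ (n / 2) := by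
    intro m n
    have := Nat.shiftRight_xor_distrib (i := 1) (a := m) (b := n)
    simpa [Nat.shiftRight_succ, Nat.shiftRight_zero] using this
  by_cases h1 : 0 ≤ a <;> by_cases h2 : 0 ≤ b
  · have ha2 : 0 ≤ a / 2 := by omega
    have hb2 : 0 ≤ b / 2 := by omega
    simp only [PySem.Int.bxor, if_pos h1, if_pos h2, if_pos ha2, if_pos hb2, hs]
    have e1 : (a / 2).toNat = a.toNat / 2 := by omega
    have e2 : (b / 2).toNat = b.toNat / 2 := by omega
    rw [e1, e2, ← hxr]
    omega
  · have ha2 : 0 ≤ a / 2 := by omega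
    have hb2 : ¬ 0 ≤ b / 2 := by omega
    simp only [PySem.Int.bxor, if_pos h1, if_neg h2, if_pos ha2, if_neg hb2, hs]
    have e1 : (a / 2).toNat = a.toNat / 2 := by omega
    have e2 : (-(b / 2) - 1).toNat = (-b - 1).toNat / 2 := by omega
    rw [e1, e2, ← hxr]
    omega
  · have ha2 : ¬ 0 ≤ a / 2 := by omega
    have hb2 : 0 ≤ b / 2 := by omega
    simp only [PySem.Int.bxor, if_neg h1, if_pos h2, if_neg ha2, if_pos hb2, hs]
    have e1 : (-(a / 2) - 1).toNat = (-a - 1).toNat / 2 := by omega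
    have e2 : (b / 2).toNat = b.toNat / 2 := by omega
    rw [e1, e2, ← hxr]
    omega
  · have ha2 : ¬ 0 ≤ a / 2 := by omega
    have hb2 : ¬ 0 ≤ b / 2 := by omega
    simp only [PySem.Int.bxor, if_neg h1, if_neg h2, if_neg ha2, if_neg hb2, hs]
    have e1 : (-(a / 2) - 1).toNat = (-a - 1).toNat / 2 := by omega
    have e2 : (-(b / 2) - 1).toNat = (-b - 1).toNat / 2 := by omega
    rw [e1, e2, ← hxr]
    omega

-- bit j of an integer xor is the parity of the sum of the operands' bits
lemma pv_bit_xor (j : Nat) (a b : Int) :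
    (PySem.Int.bxor a b >>> j) % 2 = ((a >>> j) + (b >>> j)) % 2 := by
  induction j generalizing a b with
  | zero =>
      simp only [Int.shiftRight_eq_div_pow, pow_zero, Nat.cast_one, Int.ediv_one]
      exact pv_bxor_emod2 a b
  | succ j ih =>
      have hsplit : ∀ x : Int, x >>> (j + 1) = (x >>> (1 : Nat)) >>> j := by
        intro x; rw [← Int.shiftRight_add, Nat.add_comm]
      rw [hsplit, pv_bxor_shr, ih, hsplit a, hsplit b]

-- shifting left one then right j+1 is shifting right j
lemma pv_shl_shr (x : Int) (j : Nat) : (x <<< (1 : Nat)) >>> (j + 1) = x >>> j := by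
  have h1 : (x <<< (1 : Nat)) >>> (1 : Nat) = x := by
    rw [Int.shiftLeft_eq, Int.shiftRight_eq_div_pow]
    norm_num
  rw [Nat.add_comm, Int.shiftRight_add, h1]

-- n | 1 sets bit zero
lemma pv_lor_one (n : Nat) : n ||| 1 = 2 * (n / 2) + 1 := by
  apply Nat.eq_of_testBit_eq
  intro i
  cases i with
  | zero =>
      simp only [Nat.testBit_zero]
      have h2 : (2 * (n / 2) + 1) % 2 = 1 := by omega
      simp [h2]
  | succ i =>
      have e : (2 * (n / 2) + 1) / 2 = n / 2 := by omega
      rw [Nat.testBit_lor]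
      have h1 : Nat.testBit 1 (i + 1) = false := by simp [Nat.testBit_succ]
      rw [h1, Bool.or_false, Nat.testBit_succ, Nat.testBit_succ, e]

-- a & ~1 clears bit zero
lemma pv_band_not_one (x : Int) : PySem.Int.band x (Int.not 1) = x - x % 2 := by
  have hnot : (Int.not 1 : Int) = -2 := by decide
  rw [hnot]
  by_cases hx : 0 ≤ x
  · simp only [PySem.Int.band, if_pos hx, if_neg (by norm_num : ¬ (0:Int) ≤ -2)]
    have e : (-(-2:Int) - 1).toNat = 1 := by norm_num
    rw [e, Nat.and_one_is_mod]
    omega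
  · simp only [PySem.Int.band, if_neg hx, if_neg (by norm_num : ¬ (0:Int) ≤ -2)]
    have e : (-(-2:Int) - 1).toNat = 1 := by norm_num
    rw [e, pv_lor_one]
    omega

-- or-ing a bit into an even nonnegative number is addition
lemma pv_bor_low (x b : Int) (hx : 0 ≤ x) (he : x % 2 = 0) (hb : b = 0 ∨ b = 1) :
    PySem.Int.bor x b = x + b := by
  rcases hb with hb | hb
  · rw [hb, PySem.Int.bor_zero, add_zero]
  · rw [hb, PySem.Int.bor_of_nonneg hx (by norm_num)]
    have e : (1 : Int).toNat = 1 := by norm_num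
    rw [e, pv_lor_one]
    omega

-- bitssel a j j is bit j of a
lemma pv_bitssel (x j : Int) (hj : 0 ≤ j) : pvBitssel x j j = (x >>> j.toNat) % 2 := by
  unfold pvBitssel
  have hk : (j + 1).toNat = j.toNat + 1 := by omega
  have hshift : ((-1 : Int) <<< (j.toNat + 1)) = -(2 ^ (j.toNat + 1)) := by
    rw [Int.shiftLeft_eq]; ring
  have hnotgen : ∀ y : Int, Int.not y = -y - 1 := by
    intro y
    cases y with
    | ofNat n =>
        rw [show Int.not (Int.ofNat n) = Int.negSucc n from rfl, Int.negSucc_eq,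
          Int.ofNat_eq_natCast]
        ring
    | negSucc n =>
        rw [show Int.not (Int.negSucc n) = Int.ofNat n from rfl, Int.negSucc_eq,
          Int.ofNat_eq_natCast]
        ring
  have hnot : Int.not (-(2 ^ (j.toNat + 1)) : Int) = 2 ^ (j.toNat + 1) - 1 := by
    rw [hnotgen]; ring
  rw [hk, hshift, hnot, pv_band_mask]
  have hpos : (0 : Int) < 2 ^ j.toNat := by positivity
  rw [pv_sum_bit, Int.shiftRight_eq_div_pow]
  push_cast
  rw [Int.add_mul_ediv_right _ _ (by omega : (2:Int) ^ j.toNat ≠ 0)]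
  rw [Int.ediv_eq_zero_of_lt (Int.emod_nonneg x (by omega)) (Int.emod_lt_of_pos x hpos)]
  simp [Int.shiftRight_eq_div_pow]

-- the inner per-bit loop of A accumulates exactly the masked whole-word xor of B
lemma pv_inner (n : Nat) (hn : 1 ≤ n) (r c : Int) :
    (PySem.List.pyRange 1 (n : Int)).foldl
      (fun midresult j =>
        midresult + PySem.Int.bxor (pvBitssel r (j - 1) (j - 1)) (pvBitssel r j j) <<< j.toNat)
      c
    = c + (PySem.Int.bxor r (r <<< (1 : Nat)) % 2 ^ n - PySem.Int.bxor r (r <<< (1 : Nat)) % 2) := by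
  induction n, hn using Nat.le_induction with
  | base =>
      have : PySem.List.pyRange 1 ((1 : Nat) : Int) = [] := by decide
      rw [this]
      simp
  | succ n hn ih =>
      set y := PySem.Int.bxor r (r <<< (1 : Nat)) with hy
      have hcast : ((n + 1 : Nat) : Int) = (n : Int) + 1 := by push_cast; ring
      rw [hcast, PySem.List.pyRange_one_succ_right (by exact_mod_cast hn), List.foldl_append, ih]
      simp only [List.foldl_cons, List.foldl_nil]
      -- the appended term is bit n of y, shifted up by n
      have htn : ((n : Int)).toNat = n := by omega
      have e0 : ((n : Int) - 1).toNat = n - 1 := by omega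
      have hb1 : pvBitssel r ((n : Int) - 1) ((n : Int) - 1) = (r >>> (n - 1)) % 2 := by
        rw [pv_bitssel r _ (by omega), e0]
      have hb2 : pvBitssel r (n : Int) (n : Int) = (r >>> n) % 2 := by
        rw [pv_bitssel r _ (by positivity), htn]
      have hshl : (r <<< (1 : Nat)) >>> n = r >>> (n - 1) := by
        have h := pv_shl_shr r (n - 1)
        rwa [show n - 1 + 1 = n from by omega] at h
      have hbitxor : (y >>> n) % 2 = ((r >>> (n - 1)) % 2 + (r >>> n) % 2) % 2 := by
        rw [hy, pv_bit_xor, hshl]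
        omega
      have hterm : PySem.Int.bxor ((r >>> (n - 1)) % 2) ((r >>> n) % 2) = (y >>> n) % 2 := by
        have e1 : (r >>> (n - 1)) % 2 = 0 ∨ (r >>> (n - 1)) % 2 = 1 := by omega
        have e2 : (r >>> n) % 2 = 0 ∨ (r >>> n) % 2 = 1 := by omega
        rw [hbitxor]
        rcases e1 with e1 | e1 <;> rcases e2 with e2 | e2 <;> rw [e1, e2] <;> decide
      rw [hb1, hb2, hterm, htn, Int.shiftLeft_eq]
      have hsum := pv_sum_bit y n
      have h2 : (2 : Int) ^ (n + 1) = 2 ^ n * 2 := by ring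
      rw [h2] at hsum
      rw [h2]
      linarith

-- one full stage of A equals one stage of B
lemma pv_stage (width r : Int) (hw : 1 ≤ width) :
    (PySem.List.pyRange 1 width).foldl
      (fun midresult j =>
        midresult + PySem.Int.bxor (pvBitssel r (j - 1) (j - 1)) (pvBitssel r j j) <<< j.toNat)
      (PySem.Int.bxor (PySem.Int.bxor (pvBitssel r 0 0) (pvBitssel r 2 2))
        (pvBitssel r (width - 1) (width - 1)))
    = PySem.Int.bor
        (PySem.Int.band
          (PySem.Int.band (PySem.Int.bxor r (r <<< (1 : Nat))) ((1 : Int) <<< width.toNat - 1)) (Int.not 1))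
        (PySem.Int.band
          (PySem.Int.bxor (PySem.Int.bxor r (r >>> (2 : Nat))) (r >>> (width - 1).toNat)) 1) := by
  set n := width.toNat with hn
  have hn1 : 1 ≤ n := by omega
  have hwn : width = (n : Int) := by omega
  set y := PySem.Int.bxor r (r <<< (1 : Nat)) with hy
  -- B's right-hand side, reduced to arithmetic
  have hmask : (1 : Int) <<< n - 1 = 2 ^ n - 1 := by
    rw [Int.shiftLeft_eq]; ring
  have hband1 : PySem.Int.band y ((1 : Int) <<< n - 1) = y % 2 ^ n := by
    rw [hmask, pv_band_mask]
  have h2dvd : (2 : Int) ∣ 2 ^ n := dvd_pow_self 2 (by omega)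
  have hband2 : PySem.Int.band (y % 2 ^ n) (Int.not 1) = y % 2 ^ n - y % 2 := by
    rw [pv_band_not_one, Int.emod_emod_of_dvd y h2dvd]
  set z := PySem.Int.bxor (PySem.Int.bxor r (r >>> (2 : Nat))) (r >>> (width - 1).toNat) with hz
  have hlow : PySem.Int.band z 1 = z % 2 := by
    rw [PySem.Int.band_one, PySem.Int.mod_eq_emod_of_pos (by norm_num)]
  have hynn : 0 ≤ y % 2 ^ n := Int.emod_nonneg y (by positivity)
  have hbor : PySem.Int.bor (y % 2 ^ n - y % 2) (z % 2) = y % 2 ^ n - y % 2 + z % 2 := by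
    have hy2 : y % 2 = (y % 2 ^ n) % 2 := (Int.emod_emod_of_dvd y h2dvd).symm
    refine pv_bor_low _ _ (by omega) (by omega) (by omega)
  -- A's starting value is B's low bit
  have hb0 : pvBitssel r 0 0 = r % 2 := by
    rw [pv_bitssel r 0 le_rfl]
    norm_num [Int.shiftRight_eq_div_pow]
  have hb2 : pvBitssel r 2 2 = (r >>> (2 : Nat)) % 2 := by
    rw [pv_bitssel r 2 (by norm_num), show Int.toNat 2 = (2 : Nat) from rfl]
  have hbw : pvBitssel r (width - 1) (width - 1) = (r >>> (width - 1).toNat) % 2 := by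
    rw [pv_bitssel r _ (by omega)]
  have hc : PySem.Int.bxor (PySem.Int.bxor (pvBitssel r 0 0) (pvBitssel r 2 2))
      (pvBitssel r (width - 1) (width - 1)) = z % 2 := by
    rw [hb0, hb2, hbw, hz]
    have e1 : r % 2 = 0 ∨ r % 2 = 1 := by omega
    have e2 : (r >>> (2 : Nat)) % 2 = 0 ∨ (r >>> (2 : Nat)) % 2 = 1 := by omega
    have e3 : (r >>> (width - 1).toNat) % 2 = 0 ∨ (r >>> (width - 1).toNat) % 2 = 1 := by omega
    have hinner : PySem.Int.bxor (r % 2) ((r >>> (2 : Nat)) % 2)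
        = (PySem.Int.bxor r (r >>> (2 : Nat))) % 2 := by
      rw [pv_bxor_emod2, Int.add_emod]
      rcases e1 with e | e <;> rw [e] <;> rcases e2 with e' | e' <;> rw [e'] <;> decide
    rw [hinner]
    have e4 : (PySem.Int.bxor r (r >>> (2 : Nat))) % 2 % 2 = (PySem.Int.bxor r (r >>> (2 : Nat))) % 2 := Int.emod_emod_of_dvd _ dvd_rfl
    have e5 : (PySem.Int.bxor r (r >>> (2 : Nat))) % 2 = 0 ∨ (PySem.Int.bxor r (r >>> (2 : Nat))) % 2 = 1 := by omega
    rw [pv_bxor_emod2 (PySem.Int.bxor r (r >>> (2 : Nat))) (r >>> (width - 1).toNat), Int.add_emod]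
    rcases e5 with e | e <;> rw [e] <;> rcases e3 with e' | e' <;> rw [e'] <;> decide
  rw [hc]
  rw [hwn] at *
  rw [pv_inner n hn1 r (z % 2)]
  rw [hband1, hband2, hlow, hbor]
  ring

-- projecting A's (result, midresult) pair fold onto B's plain fold
lemma pv_fold_pair {α : Type} (l : List α) (F : Int × Int → α → Int × Int) (f g : Int → Int)
    (hF : ∀ st x, F st x = (f st.1, f st.1)) (h : ∀ r, f r = g r) :
    ∀ p : Int × Int, (l.foldl F p).1 = l.foldl (fun r _ => g r) p.1 := by
  induction l with
  | nil => intro p; rfl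
  | cons x xs ih =>
      intro p
      simp only [List.foldl_cons, hF]
      rw [ih]
      simp [h]

-- ===== VERDICT (by name: the statement is the Claim_ definition above) =====
theorem xorstage_spec : Claim_equal_xorstage := by
  intro a width stages hdom hpre
  unfold Spec_xorstage
  unfold xorstage xorstage_alt
  exact pv_fold_pair _ _ _ _ (fun st x => rfl) (fun r => pv_stage width r hpre.1) (a, 0)
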